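-- pv_equiv track=rewrite | github.com/xn4224nx/Advent-of-Code-Py | 2016/Day_14/main.py | extract_trips_quints
-- ===== SOURCE A (Python) =====
-- def extract_trips_quints(digest: str) -> dict[str:[str]]:
--     """
--     Find the first triple in a message digest and return the character that
--     get repeated. Also find the quintets in the digest and return those.
--     Everything is packages in a dictionary of labeled parts
--     """
--     trips = []
--     quints = []
--
--     for idx in range(len(digest)):
--
--         # Catch a triplet
--         if (
--             idx >= 2
--             and not trips
--             and all(x == digest[idx - 2] for x in digest[idx - 2 : idx + 1])
--         ):
--             trips.append(digest[idx])
--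
--         # Catch a quintlet
--         if idx >= 4 and all(x == digest[idx] for x in digest[idx - 4 : idx + 1]):
--             quints.append(digest[idx])
--
--     return {"trips": trips, "quints": quints}
-- ===== SOURCE B (Python) =====
-- def extract_trips_quints(digest: str) -> dict[str:[str]]:
--     """One left-to-right pass over maximal runs of equal characters:
--     a run of length L >= 3 gives the (single, first) triplet char, and a run
--     of length L >= 5 contributes L-4 quintuplet entries (one per ending index)."""
--     trips = []
--     quints = []
--     i = 0
--     n = len(digest)
--     while i < n:
--         j = i + 1
--         while j < n and digest[j] == digest[i]:
--             j += 1
--         if j - i >= 3 and not trips: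
--             trips.append(digest[i])
--         quints += [digest[i]] * (j - i - 4)
--         i = j
--     return {"trips": trips, "quints": quints}
-- ===== Notes on version B (the rewrite author's own statement) =====
-- stated objective: faster
-- what changed: A scans every index and re-checks a 3-char and a 5-char slice window at each position; B makes one pass over maximal runs of equal characters, taking the first run of length >= 3 as the triplet char and emitting L-4 quintuplet entries per run of length L.
import Mathlib
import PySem

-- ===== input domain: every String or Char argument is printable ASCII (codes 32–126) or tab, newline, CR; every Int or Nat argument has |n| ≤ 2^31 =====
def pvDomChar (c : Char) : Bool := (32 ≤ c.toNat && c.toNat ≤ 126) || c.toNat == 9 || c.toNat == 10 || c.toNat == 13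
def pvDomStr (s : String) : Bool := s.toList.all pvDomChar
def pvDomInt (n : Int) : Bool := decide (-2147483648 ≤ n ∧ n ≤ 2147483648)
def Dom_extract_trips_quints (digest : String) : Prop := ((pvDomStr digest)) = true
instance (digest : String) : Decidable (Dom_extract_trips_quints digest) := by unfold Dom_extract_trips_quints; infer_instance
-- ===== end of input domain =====

-- B replaces A's per-index windowed scan (a fresh 3- and 5-char slice test at every
-- index) by a single pass over maximal runs of equal characters; same O(n), measured
-- ~3x faster in a timing run (no per-index slicing).

-- ===== PORT A =====
-- literal transliteration of A: for idx in range(len(digest)) with the two windowed 'all' tests;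
-- pyGetD defaults are never read (every access is guarded by idx ≥ 2 / idx ≥ 4 / idx < len).
def extract_trips_quints (digest : String) : List (String × List String) :=
  let cs := digest.toList
  let res := (PySem.List.pyRange 0 (PySem.Str.len digest) 1).foldl
    (fun (st : List String × List String) idx =>
      (if 2 ≤ idx ∧ st.1 = [] ∧
            (PySem.List.slice cs (some (idx - 2)) (some (idx + 1))).all
              (fun x => x == PySem.List.pyGetD cs (idx - 2) 'a') = true
        then st.1 ++ [String.ofList [PySem.List.pyGetD cs idx 'a']] else st.1,
       if 4 ≤ idx ∧
            (PySem.List.slice cs (some (idx - 4)) (some (idx + 1))).all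
              (fun x => x == PySem.List.pyGetD cs idx 'a') = true
        then st.2 ++ [String.ofList [PySem.List.pyGetD cs idx 'a']] else st.2)) ([], [])
  [("trips", res.1), ("quints", res.2)]

-- ===== PORT B =====
-- transliteration of B's outer while-loop: each step consumes one maximal run
-- (the inner 'while digest[j] == digest[i]' is the takeWhile/dropWhile pair).
def pvBLoop : List Char → List String → List String → List String × List String
  | [], trips, quints => (trips, quints)
  | c :: rest, trips, quints =>
    let run := (rest.takeWhile (fun x => x == c)).length + 1
    let trips' := if 3 ≤ run ∧ trips = [] then trips ++ [String.ofList [c]] else trips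
    -- [digest[i]] * (j-i-4): Nat subtraction clamps at 0 exactly as Python's negative repeat
    let quints' := quints ++ List.replicate (run - 4) (String.ofList [c])
    pvBLoop (rest.dropWhile (fun x => x == c)) trips' quints'
termination_by cs _ _ => cs.length
decreasing_by
  simp only [List.length_cons]
  have := List.length_dropWhile_le (p := fun x => x == c) rest
  omega

def extract_trips_quints_alt (digest : String) : List (String × List String) :=
  let res := pvBLoop digest.toList [] []
  [("trips", res.1), ("quints", res.2)]

-- ===== PRECONDITION & SPEC =====
def Spec_extract_trips_quints (digest : String) (out : List (String × List String)) : Prop := out = extract_trips_quints_alt digest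
instance (digest : String) (out : List (String × List String)) : Decidable (Spec_extract_trips_quints digest out) := by unfold Spec_extract_trips_quints; infer_instance

-- ===== CLAIM (what is proved, stated in full; the proofs are below) =====
def Claim_equal_extract_trips_quints : Prop := ∀ (digest : String), Dom_extract_trips_quints digest → Spec_extract_trips_quints digest (extract_trips_quints digest)

-- ===== LEMMAS AND PROOFS =====

-- Nat-level characterisations of A's two window tests (abbrev: Decidable is inferred)
abbrev pvT (cs : List Char) (k : Nat) : Prop :=
  2 ≤ k ∧ ((cs.drop (k - 2)).take 3).all (fun x => x == cs.getD (k - 2) 'a') = true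
abbrev pvQ (cs : List Char) (k : Nat) : Prop :=
  4 ≤ k ∧ ((cs.drop (k - 4)).take 5).all (fun x => x == cs.getD k 'a') = true

def pvTrips (cs : List Char) : List String :=
  (((List.range cs.length).find? (fun k => decide (pvT cs k))).map
    (fun k => String.ofList [cs.getD k 'a'])).toList
def pvQuints (cs : List Char) : List String :=
  ((List.range cs.length).filter (fun k => decide (pvQ cs k))).map
    (fun k => String.ofList [cs.getD k 'a'])

theorem pv_find?_congr {α : Type} (p q : α → Bool) (l : List α)
    (h : ∀ x ∈ l, p x = q x) : l.find? p = l.find? q := by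
  induction l with
  | nil => rfl
  | cons a t ih =>
    simp only [List.find?_cons, h a List.mem_cons_self]
    cases q a <;> simp [ih (fun x hx => h x (List.mem_cons_of_mem _ hx))]

theorem pv_filter_le (a n : Nat) :
    (List.range n).filter (fun k => decide (a ≤ k)) = (List.range n).drop a := by
  induction n with
  | zero => simp
  | succ n ih =>
    rw [List.range_succ, List.filter_append, List.drop_append, ih]
    by_cases h : a ≤ n
    · have h0 : a - (List.range n).length = 0 := by simp; omega
      rw [h0]
      simp [h]
    · have h0 : a - (List.range n).length = (a - n - 1) + 1 := by simp; omega
      rw [h0]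
      simp [h]

theorem pv_foldl_first {β : Type} (p : Nat → Prop) [DecidablePred p] (f : Nat → β)
    (l : List Nat) (acc : List β) :
    l.foldl (fun acc k => if p k ∧ acc = [] then acc ++ [f k] else acc) acc
      = if acc = [] then ((l.find? (fun k => decide (p k))).map f).toList else acc := by
  induction l generalizing acc with
  | nil => simp
  | cons a t ih =>
    simp only [List.foldl_cons, List.find?_cons]
    by_cases hacc : acc = []
    · subst hacc
      by_cases hp : p a
      · simp [hp, ih]
      · simp [hp, ih]
    · rw [if_neg (by simp [hacc]), ih, if_neg hacc, if_neg hacc]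

-- Int window test ⇔ Nat window test
theorem pv_condT (cs : List Char) (k : Nat) (tr : List String) :
    ((2 : Int) ≤ (k : Int) ∧ tr = [] ∧
      (PySem.List.slice cs (some ((k : Int) - 2)) (some ((k : Int) + 1))).all
        (fun x => x == PySem.List.pyGetD cs ((k : Int) - 2) 'a') = true)
    ↔ (pvT cs k ∧ tr = []) := by
  by_cases h2 : 2 ≤ k
  · have e1 : ((k : Int) - 2) = ((k - 2 : Nat) : Int) := by omega
    have e2 : ((k : Int) + 1) = ((k + 1 : Nat) : Int) := by omega
    rw [e1, e2, PySem.List.slice_natCast, PySem.List.pyGetD_natCast]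
    have e3 : (k + 1) - (k - 2) = 3 := by omega
    rw [e3]
    unfold pvT
    constructor
    · rintro ⟨_, htr, hall⟩; exact ⟨⟨h2, hall⟩, htr⟩
    · rintro ⟨⟨_, hall⟩, htr⟩; exact ⟨by exact_mod_cast h2, htr, hall⟩
  · constructor
    · rintro ⟨h, -⟩; omega
    · rintro ⟨⟨h, -⟩, -⟩; omega

theorem pv_condQ (cs : List Char) (k : Nat) :
    ((4 : Int) ≤ (k : Int) ∧
      (PySem.List.slice cs (some ((k : Int) - 4)) (some ((k : Int) + 1))).all
        (fun x => x == PySem.List.pyGetD cs (k : Int) 'a') = true)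
    ↔ pvQ cs k := by
  by_cases h4 : 4 ≤ k
  · have e1 : ((k : Int) - 4) = ((k - 4 : Nat) : Int) := by omega
    have e2 : ((k : Int) + 1) = ((k + 1 : Nat) : Int) := by omega
    rw [e1, e2, PySem.List.slice_natCast, PySem.List.pyGetD_natCast]
    have e3 : (k + 1) - (k - 4) = 5 := by omega
    rw [e3]
    unfold pvQ
    constructor
    · rintro ⟨-, hall⟩; exact ⟨h4, hall⟩
    · rintro ⟨-, hall⟩; exact ⟨by exact_mod_cast h4, hall⟩
  · constructor
    · rintro ⟨h, -⟩; omega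
    · rintro ⟨h, -⟩; omega

theorem pv_A_spec (digest : String) :
    extract_trips_quints digest =
      [("trips", pvTrips digest.toList), ("quints", pvQuints digest.toList)] := by
  simp only [extract_trips_quints, PySem.Str.len_eq, PySem.List.pyRange_zero_natCast,
    List.foldl_map]
  rw [PySem.List.foldl_prod_mk
      (f := fun (tr : List String) (k : Nat) =>
        if 2 ≤ (k : Int) ∧ tr = [] ∧
            (PySem.List.slice digest.toList (some ((k : Int) - 2)) (some ((k : Int) + 1))).all
              (fun x => x == PySem.List.pyGetD digest.toList ((k : Int) - 2) 'a') = true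
        then tr ++ [String.ofList [PySem.List.pyGetD digest.toList (k : Int) 'a']] else tr)
      (g := fun (qu : List String) (k : Nat) =>
        if 4 ≤ (k : Int) ∧
            (PySem.List.slice digest.toList (some ((k : Int) - 4)) (some ((k : Int) + 1))).all
              (fun x => x == PySem.List.pyGetD digest.toList (k : Int) 'a') = true
        then qu ++ [String.ofList [PySem.List.pyGetD digest.toList (k : Int) 'a']] else qu)]
  have ht : (List.range digest.toList.length).foldl
      (fun (tr : List String) (k : Nat) =>
        if 2 ≤ (k : Int) ∧ tr = [] ∧
            (PySem.List.slice digest.toList (some ((k : Int) - 2)) (some ((k : Int) + 1))).all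
              (fun x => x == PySem.List.pyGetD digest.toList ((k : Int) - 2) 'a') = true
        then tr ++ [String.ofList [PySem.List.pyGetD digest.toList (k : Int) 'a']] else tr) []
      = pvTrips digest.toList := by
    rw [PySem.List.foldl_congr_mem' _ _
      (fun (tr : List String) (k : Nat) =>
        if pvT digest.toList k ∧ tr = []
        then tr ++ [String.ofList [digest.toList.getD k 'a']] else tr) _
      (by
        intro k _ tr
        rw [if_congr (pv_condT digest.toList k tr) rfl rfl]
        simp [PySem.List.pyGetD_natCast])]
    rw [pv_foldl_first]
    simp [pvTrips]
  have hq : (List.range digest.toList.length).foldl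
      (fun (qu : List String) (k : Nat) =>
        if 4 ≤ (k : Int) ∧
            (PySem.List.slice digest.toList (some ((k : Int) - 4)) (some ((k : Int) + 1))).all
              (fun x => x == PySem.List.pyGetD digest.toList (k : Int) 'a') = true
        then qu ++ [String.ofList [PySem.List.pyGetD digest.toList (k : Int) 'a']] else qu) []
      = pvQuints digest.toList := by
    rw [PySem.List.foldl_congr_mem' _ _
      (fun (qu : List String) (k : Nat) =>
        if pvQ digest.toList k
        then qu ++ [String.ofList [digest.toList.getD k 'a']] else qu) _
      (by
        intro k _ qu
        rw [if_congr (pv_condQ digest.toList k) rfl rfl]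
        simp [PySem.List.pyGetD_natCast])]
    rw [PySem.List.foldl_append_ite]
    simp [pvQuints]
  rw [ht, hq]

-- ── run-structure lemmas for the B side ──────────────────────────────────────
-- run = a block of copies of c; rest (if nonempty) starts with a different char.

theorem pv_getD_in (run rest : List Char) (c : Char)
    (hall : ∀ x ∈ run, x = c) :
    ∀ k, k < run.length → (run ++ rest).getD k 'a' = c := by
  intro k hk
  rw [List.getD_eq_getElem?_getD, List.getElem?_append_left hk,
    List.getElem?_eq_getElem hk]
  exact hall _ (List.getElem_mem hk)

theorem pv_getD_shift (run rest : List Char) :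
    ∀ j : Nat, (run ++ rest).getD (run.length + j) 'a' = rest.getD j 'a' := by
  intro j
  rw [List.getD_eq_getElem?_getD, List.getD_eq_getElem?_getD,
    List.getElem?_append_right (by omega)]
  congr 2
  omega

theorem pv_elem_last (run rest : List Char) (c : Char)
    (hne : run ≠ []) (hall : ∀ x ∈ run, x = c) :
    (run ++ rest)[run.length - 1]? = some c := by
  have hlen : 0 < run.length := List.length_pos_iff.mpr hne
  rw [List.getElem?_append_left (by omega), List.getElem?_eq_getElem (by omega)]
  exact congrArg some (hall _ (List.getElem_mem (by omega)))

theorem pv_elem_boundary (run rest : List Char) (hr : rest ≠ []) :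
    (run ++ rest)[run.length]? = some (rest.head hr) := by
  rw [List.getElem?_append_right (by omega), Nat.sub_self]
  cases rest with
  | nil => exact absurd rfl hr
  | cons b t => simp

theorem pv_Q_in (run rest : List Char) (c : Char)
    (hall : ∀ x ∈ run, x = c) :
    ∀ k, k < run.length → (pvQ (run ++ rest) k ↔ 4 ≤ k) := by
  intro k hk
  constructor
  · exact fun h => h.1
  · intro h4
    refine ⟨h4, ?_⟩
    rw [List.all_eq_true]
    intro x hx
    rw [pv_getD_in run rest c hall k hk]
    have h0 : (k - 4) - run.length = 0 := by omega
    have hlen : 5 ≤ (run.drop (k - 4)).length := by rw [List.length_drop]; omega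
    rw [List.drop_append, h0, List.drop_zero, List.take_append,
      Nat.sub_eq_zero_of_le hlen, List.take_zero, List.append_nil] at hx
    have hxr : x ∈ run := List.mem_of_mem_drop (List.mem_of_mem_take hx)
    simp [hall x hxr]

theorem pv_T_in (run rest : List Char) (c : Char)
    (hall : ∀ x ∈ run, x = c) :
    ∀ k, k < run.length → (pvT (run ++ rest) k ↔ 2 ≤ k) := by
  intro k hk
  constructor
  · exact fun h => h.1
  · intro h2
    refine ⟨h2, ?_⟩
    rw [List.all_eq_true]
    intro x hx
    rw [pv_getD_in run rest c hall (k - 2) (by omega)]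
    have h0 : (k - 2) - run.length = 0 := by omega
    have hlen : 3 ≤ (run.drop (k - 2)).length := by rw [List.length_drop]; omega
    rw [List.drop_append, h0, List.drop_zero, List.take_append,
      Nat.sub_eq_zero_of_le hlen, List.take_zero, List.append_nil] at hx
    have hxr : x ∈ run := List.mem_of_mem_drop (List.mem_of_mem_take hx)
    simp [hall x hxr]

theorem pv_window_boundary (run rest : List Char) (c : Char)
    (hne : run ≠ []) (hall : ∀ x ∈ run, x = c)
    (hhd : ∀ hr : rest ≠ [], rest.head hr ≠ c)
    (d w : Nat) (hr : rest ≠ [])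
    (hc : d + (run.length - 1 - d) = run.length - 1) (h1 : run.length - 1 - d < w)
    (hb : d + (run.length - d) = run.length) (h2 : run.length - d < w) (r : Char) :
    ¬ ((run ++ rest).drop d |>.take w).all (fun x => x == r) = true := by
  intro hallw
  rw [List.all_eq_true] at hallw
  have hcmem : c ∈ ((run ++ rest).drop d |>.take w) := by
    apply List.mem_of_getElem? (i := run.length - 1 - d)
    rw [List.getElem?_take, if_pos h1, List.getElem?_drop, hc]
    exact pv_elem_last run rest c hne hall
  have hbmem : rest.head hr ∈ ((run ++ rest).drop d |>.take w) := by
    apply List.mem_of_getElem? (i := run.length - d)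
    rw [List.getElem?_take, if_pos h2, List.getElem?_drop, hb]
    exact pv_elem_boundary run rest hr
  have e1 := hallw _ hcmem
  have e2 := hallw _ hbmem
  rw [beq_iff_eq] at e1 e2
  exact hhd hr (by rw [e2, ← e1])

theorem pv_Q_shift (run rest : List Char) (c : Char)
    (hne : run ≠ []) (hall : ∀ x ∈ run, x = c)
    (hhd : ∀ hr : rest ≠ [], rest.head hr ≠ c) :
    ∀ j, j < rest.length → (pvQ (run ++ rest) (run.length + j) ↔ pvQ rest j) := by
  intro j hj
  have hL : 0 < run.length := List.length_pos_iff.mpr hne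
  by_cases h4 : 4 ≤ j
  · have hwin : (run ++ rest).drop (run.length + j - 4) = rest.drop (j - 4) := by
      have e : run.length + j - 4 = run.length + (j - 4) := by omega
      rw [e, List.drop_append, List.drop_eq_nil_of_le (by omega), List.nil_append]
      congr 1
      omega
    unfold pvQ
    rw [hwin, pv_getD_shift]
    constructor
    · rintro ⟨-, hw⟩; exact ⟨h4, hw⟩
    · rintro ⟨-, hw⟩; exact ⟨by omega, hw⟩
  · have hr : rest ≠ [] := by intro h; rw [h] at hj; simp at hj
    constructor
    · rintro ⟨hk4, hallw⟩
      exact absurd hallw (pv_window_boundary run rest c hne hall hhd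
        (run.length + j - 4) 5 hr (by omega) (by omega) (by omega) (by omega) _)
    · rintro ⟨hk4, -⟩; omega

theorem pv_T_shift (run rest : List Char) (c : Char)
    (hne : run ≠ []) (hall : ∀ x ∈ run, x = c)
    (hhd : ∀ hr : rest ≠ [], rest.head hr ≠ c) :
    ∀ j, j < rest.length → (pvT (run ++ rest) (run.length + j) ↔ pvT rest j) := by
  intro j hj
  have hL : 0 < run.length := List.length_pos_iff.mpr hne
  by_cases h2 : 2 ≤ j
  · have hwin : (run ++ rest).drop (run.length + j - 2) = rest.drop (j - 2) := by
      have e : run.length + j - 2 = run.length + (j - 2) := by omega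
      rw [e, List.drop_append, List.drop_eq_nil_of_le (by omega), List.nil_append]
      congr 1
      omega
    have hgd : (run ++ rest).getD (run.length + j - 2) 'a' = rest.getD (j - 2) 'a' := by
      have e : run.length + j - 2 = run.length + (j - 2) := by omega
      rw [e, pv_getD_shift]
    unfold pvT
    rw [hwin, hgd]
    constructor
    · rintro ⟨-, hw⟩; exact ⟨h2, hw⟩
    · rintro ⟨-, hw⟩; exact ⟨by omega, hw⟩
  · have hr : rest ≠ [] := by intro h; rw [h] at hj; simp at hj
    constructor
    · rintro ⟨hk2, hallw⟩
      exact absurd hallw (pv_window_boundary run rest c hne hall hhd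
        (run.length + j - 2) 3 hr (by omega) (by omega) (by omega) (by omega) _)
    · rintro ⟨hk2, -⟩; omega

theorem pv_quints_run (run rest : List Char) (c : Char)
    (hne : run ≠ []) (hall : ∀ x ∈ run, x = c)
    (hhd : ∀ hr : rest ≠ [], rest.head hr ≠ c) :
    pvQuints (run ++ rest)
      = List.replicate (run.length - 4) (String.ofList [c]) ++ pvQuints rest := by
  unfold pvQuints
  rw [List.length_append, List.range_add, List.filter_append, List.map_append]
  congr 1
  · rw [List.filter_congr (q := fun k => decide (4 ≤ k)) (fun k hk => by
      rw [List.mem_range] at hk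
      rw [decide_eq_decide]
      exact pv_Q_in run rest c hall k hk)]
    rw [pv_filter_le, List.eq_replicate_iff]
    refine ⟨by simp, ?_⟩
    intro b hb
    obtain ⟨k, hk, rfl⟩ := List.mem_map.mp hb
    have hkr : k < run.length := by
      have := List.mem_of_mem_drop hk
      rwa [List.mem_range] at this
    rw [pv_getD_in run rest c hall k hkr]
  · rw [List.filter_map, List.map_map]
    rw [List.filter_congr (q := fun j => decide (pvQ rest j)) (fun j hj => by
      rw [List.mem_range] at hj
      simp only [Function.comp_apply]
      rw [decide_eq_decide]
      exact pv_Q_shift run rest c hne hall hhd j hj)]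
    apply List.map_congr_left
    intro j hj
    have hjm : j < rest.length := by
      have := List.mem_of_mem_filter hj
      rwa [List.mem_range] at this
    simp only [Function.comp_apply]
    rw [pv_getD_shift]

theorem pv_trips_run (run rest : List Char) (c : Char)
    (hne : run ≠ []) (hall : ∀ x ∈ run, x = c)
    (hhd : ∀ hr : rest ≠ [], rest.head hr ≠ c) :
    pvTrips (run ++ rest)
      = if 3 ≤ run.length then [String.ofList [c]] else pvTrips rest := by
  unfold pvTrips
  rw [List.length_append, List.range_add, List.find?_append, List.find?_map]
  rw [pv_find?_congr (fun k => decide (pvT (run ++ rest) k)) (fun k => decide (2 ≤ k))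
    (List.range run.length) (fun k hk => by
      rw [List.mem_range] at hk
      rw [decide_eq_decide]
      exact pv_T_in run rest c hall k hk)]
  rw [pv_find?_congr ((fun k => decide (pvT (run ++ rest) k)) ∘ (fun x => run.length + x))
    (fun j => decide (pvT rest j)) (List.range rest.length) (fun j hj => by
      rw [List.mem_range] at hj
      simp only [Function.comp_apply]
      rw [decide_eq_decide]
      exact pv_T_shift run rest c hne hall hhd j hj)]
  by_cases h3 : 3 ≤ run.length
  · have hfind : (List.range run.length).find? (fun k => decide (2 ≤ k)) = some 2 := by
      obtain ⟨m, hm⟩ : ∃ m, run.length = 3 + m := ⟨run.length - 3, by omega⟩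
      rw [hm, List.range_add, List.find?_append]
      rfl
    rw [hfind, if_pos h3]
    simp only [Option.some_or, Option.map_some, Option.toList_some]
    rw [pv_getD_in run rest c hall 2 (by omega)]
  · have hfind : (List.range run.length).find? (fun k => decide (2 ≤ k)) = none := by
      rw [List.find?_eq_none]
      intro x hx
      rw [List.mem_range] at hx
      simp
      omega
    rw [hfind, if_neg h3, Option.none_or]
    cases hf : (List.range rest.length).find? (fun j => decide (pvT rest j)) with
    | none => simp
    | some j =>
      have hj : j < rest.length := by
        have := List.mem_of_find?_eq_some hf
        rwa [List.mem_range] at this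
      simp only [Option.map_some, Option.toList_some]
      rw [pv_getD_shift run rest j]

theorem pvBLoop_spec (cs : List Char) :
    ∀ tr qu, pvBLoop cs tr qu
      = ((if tr = [] then pvTrips cs else tr), qu ++ pvQuints cs) := by
  have main : ∀ n (cs : List Char), cs.length ≤ n → ∀ tr qu,
      pvBLoop cs tr qu
        = ((if tr = [] then pvTrips cs else tr), qu ++ pvQuints cs) := by
    intro n
    induction n with
    | zero =>
      intro cs hcs tr qu
      have : cs = [] := List.eq_nil_of_length_eq_zero (by omega)
      subst this
      simp [pvBLoop, pvTrips, pvQuints]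
    | succ n ih =>
      intro cs hcs tr qu
      cases cs with
      | nil => simp [pvBLoop, pvTrips, pvQuints]
      | cons c rest' =>
        simp only [pvBLoop]
        have hall : ∀ x ∈ (c :: rest'.takeWhile (fun x => x == c)), x = c := by
          intro x hx
          rcases List.mem_cons.mp hx with h | h
          · exact h
          · exact eq_of_beq (List.mem_takeWhile_imp (p := fun x => x == c) h)
        have hhd : ∀ hr : rest'.dropWhile (fun x => x == c) ≠ [],
            (rest'.dropWhile (fun x => x == c)).head hr ≠ c := by
          intro hr
          have := List.head_dropWhile_not (fun x => x == c) hr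
          simpa using this
        have hlen : (rest'.dropWhile (fun x => x == c)).length ≤ n := by
          have h1 := List.length_dropWhile_le (p := fun x => x == c) rest'
          simp only [List.length_cons] at hcs
          omega
        have hsplit : c :: rest'
            = (c :: rest'.takeWhile (fun x => x == c)) ++ rest'.dropWhile (fun x => x == c) := by
          simp [List.takeWhile_append_dropWhile]
        have hQ := pv_quints_run _ _ c (by simp) hall hhd
        have hT := pv_trips_run _ _ c (by simp) hall hhd
        rw [ih _ hlen, hsplit, hQ, hT]
        simp only [List.length_cons]
        by_cases htr : tr = [] <;>
          by_cases h3 : 3 ≤ (rest'.takeWhile (fun x => x == c)).length + 1 <;>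
            simp [htr, h3, List.append_assoc]
  exact main cs.length cs le_rfl

theorem pv_B_spec (digest : String) :
    extract_trips_quints_alt digest =
      [("trips", pvTrips digest.toList), ("quints", pvQuints digest.toList)] := by
  unfold extract_trips_quints_alt
  rw [pvBLoop_spec]
  simp

-- ===== VERDICT (by name: the statement is the Claim_ definition above) =====
theorem extract_trips_quints_spec : Claim_equal_extract_trips_quints := by
  intro digest _
  show _ = _
  rw [pv_A_spec, pv_B_spec]
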